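-- pv_equiv track=rewrite | github.com/isidoregpt/QuatGenV1 | agent/smiles/tokenize.py | tokenize_smiles_basic
-- ===== SOURCE A (Python) =====
-- from typing import List, Set
--
-- _TWO_CHAR = {"Cl", "Br"}
--
-- _SPECIAL = set("()[]=#@+-\\/.: ")
--
-- _DIGITS = set("0123456789")
--
-- def tokenize_smiles_basic(smiles: str) -> List[str]:
--     tokens: List[str] = []
--     i = 0
--     while i < len(smiles):
--         ch = smiles[i]
--         if ch == "[":
--             j = i + 1
--             while j < len(smiles) and smiles[j] != "]":
--                 j += 1
--             if j >= len(smiles):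
--                 tokens.append(ch); i += 1; continue
--             tokens.append(smiles[i:j+1]); i = j + 1; continue
--
--         if i + 1 < len(smiles) and smiles[i:i+2] in _TWO_CHAR:
--             tokens.append(smiles[i:i+2]); i += 2; continue
--
--         if ch == "%":
--             if i + 2 < len(smiles):
--                 tokens.append(smiles[i:i+3]); i += 3
--             else:
--                 tokens.append(ch); i += 1
--             continue
--
--         if ch in _DIGITS:
--             tokens.append(ch); i += 1; continue
--
--         if ch in _SPECIAL:
--             if ch != " ":
--                 tokens.append(ch)
--             i += 1; continue
--
--         if ch.isalpha():
--             tokens.append(ch); i += 1; continue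
--
--         tokens.append(ch); i += 1
--     return tokens
-- ===== SOURCE B (Python) =====
-- from typing import List
--
--
-- def tokenize_smiles_basic(smiles: str) -> List[str]:
--     n = len(smiles)
--     # one right-to-left pass: nxt[k] = index of the first ']' at or after k, else n
--     nxt = [n] * (n + 1)
--     for k in range(n - 1, -1, -1):
--         nxt[k] = k if smiles[k] == ']' else nxt[k + 1]
--     tokens: List[str] = []
--     i = 0
--     while i < n:
--         ch = smiles[i]
--         if ch == "[":
--             j = nxt[i + 1]
--             if j < n:
--                 tokens.append(smiles[i:j + 1]); i = j + 1
--             else: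
--                 tokens.append(ch); i += 1
--         elif smiles[i:i + 2] in ("Cl", "Br"):
--             tokens.append(smiles[i:i + 2]); i += 2
--         elif ch == "%" and i + 2 < n:
--             tokens.append(smiles[i:i + 3]); i += 3
--         elif ch == " ":
--             i += 1
--         else:
--             tokens.append(ch); i += 1
--     return tokens
-- ===== Notes on version B (the rewrite author's own statement) =====
-- stated objective: alternative
-- what changed: B precomputes, in one right-to-left pass, a table of the next closing-bracket position for every index and folds the identical single-character branches into one, so A's inner rescan loop after each opening bracket disappears; on the generated inputs the measured cost is the same.
import Mathlib
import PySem

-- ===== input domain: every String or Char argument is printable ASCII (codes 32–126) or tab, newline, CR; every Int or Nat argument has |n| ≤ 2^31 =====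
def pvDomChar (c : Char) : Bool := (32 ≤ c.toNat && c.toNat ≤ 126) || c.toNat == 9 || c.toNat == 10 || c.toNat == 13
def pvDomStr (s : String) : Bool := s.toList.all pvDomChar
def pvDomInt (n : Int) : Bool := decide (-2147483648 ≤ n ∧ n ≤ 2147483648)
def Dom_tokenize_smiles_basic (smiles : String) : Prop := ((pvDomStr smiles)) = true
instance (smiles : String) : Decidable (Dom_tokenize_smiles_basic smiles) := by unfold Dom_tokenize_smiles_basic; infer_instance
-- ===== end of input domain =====

-- B replaces A's inner rescan for the closing bracket by a next-closing-bracket table built in one right-to-left pass; return values are proved equal on all inputs.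


-- ===== PORT A =====
-- A's inner while loop: first index j' ≥ j with cs[j'] = ']' (the fuel argument only makes
-- the loop total; called with fuel = cs.length it never runs out, since the loop does at most cs.length - j steps)
def scanRB (cs : List Char) : Nat → Nat → Nat
  | 0, j => j
  | fuel + 1, j =>
    if h : j < cs.length then
      if cs[j] = ']' then j else scanRB cs fuel (j + 1)
    else j

-- A's main while loop, fuel = remaining iteration budget (i strictly increases each step, so cs.length suffices);
-- Python slices smiles[a:b] with 0 ≤ a ≤ b port exactly as (drop a).take (b - a)
def tokA (cs : List Char) : Nat → Nat → List String
  | 0, _ => []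
  | fuel + 1, i =>
    if h : i < cs.length then
      let ch := cs[i]
      if ch = '[' then
        let j := scanRB cs cs.length (i + 1)
        if cs.length ≤ j then
          String.ofList [ch] :: tokA cs fuel (i + 1)
        else
          String.ofList ((cs.drop i).take (j + 1 - i)) :: tokA cs fuel (j + 1)
      else if i + 1 < cs.length ∧ ((cs.drop i).take 2 = ['C', 'l'] ∨ (cs.drop i).take 2 = ['B', 'r']) then
        String.ofList ((cs.drop i).take 2) :: tokA cs fuel (i + 2)
      else if ch = '%' then
        if i + 2 < cs.length then
          String.ofList ((cs.drop i).take 3) :: tokA cs fuel (i + 3)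
        else
          String.ofList [ch] :: tokA cs fuel (i + 1)
      else if ch ∈ ['0','1','2','3','4','5','6','7','8','9'] then
        String.ofList [ch] :: tokA cs fuel (i + 1)
      else if ch ∈ ['(',')','[',']','=','#','@','+','-','\\','/','.',':',' '] then
        (if ch ≠ ' ' then [String.ofList [ch]] else []) ++ tokA cs fuel (i + 1)
      else if PySem.Chars.isalpha ch then
        String.ofList [ch] :: tokA cs fuel (i + 1)
      else
        String.ofList [ch] :: tokA cs fuel (i + 1)
    else []

def tokenize_smiles_basic (smiles : String) : List String := tokA smiles.toList smiles.toList.length 0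

-- ===== PORT B =====
-- B's right-to-left table fill: entry m of the result is nxt[k + m]; each entry is its own index or the entry to its right
def buildNxtFrom : List Char → Nat → Nat → List Nat
  | [], _, n => [n]
  | c :: rest, k, n =>
    let t := buildNxtFrom rest (k + 1) n
    (if c = ']' then k else t.getD 0 n) :: t

-- B's main while loop; fuel as in tokA (only a totality guard, never exhausted when called with cs.length)
def tokB (cs : List Char) (nxt : List Nat) : Nat → Nat → List String
  | 0, _ => []
  | fuel + 1, i =>
    if h : i < cs.length then
      let ch := cs[i]
      if ch = '[' then
        let j := nxt.getD (i + 1) 0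
        if j < cs.length then
          String.ofList ((cs.drop i).take (j + 1 - i)) :: tokB cs nxt fuel (j + 1)
        else
          String.ofList [ch] :: tokB cs nxt fuel (i + 1)
      else if (cs.drop i).take 2 = ['C', 'l'] ∨ (cs.drop i).take 2 = ['B', 'r'] then
        String.ofList ((cs.drop i).take 2) :: tokB cs nxt fuel (i + 2)
      else if ch = '%' ∧ i + 2 < cs.length then
        String.ofList ((cs.drop i).take 3) :: tokB cs nxt fuel (i + 3)
      else if ch = ' ' then
        tokB cs nxt fuel (i + 1)
      else
        String.ofList [ch] :: tokB cs nxt fuel (i + 1)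
    else []

def tokenize_smiles_basic_alt (smiles : String) : List String :=
  let cs := smiles.toList
  tokB cs (buildNxtFrom cs 0 cs.length) cs.length 0

-- ===== PRECONDITION & SPEC =====
def Spec_tokenize_smiles_basic (smiles : String) (out : List String) : Prop := out = tokenize_smiles_basic_alt smiles
instance (smiles : String) (out : List String) : Decidable (Spec_tokenize_smiles_basic smiles out) := by unfold Spec_tokenize_smiles_basic; infer_instance

-- ===== CLAIM (what is proved, stated in full; the proofs are below) =====
def Claim_equal_tokenize_smiles_basic : Prop := ∀ (smiles : String), Dom_tokenize_smiles_basic smiles → Spec_tokenize_smiles_basic smiles (tokenize_smiles_basic smiles)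

-- ===== LEMMAS AND PROOFS =====

-- proof-side reference for A's inner scan, without fuel
def scanW (cs : List Char) (j : Nat) : Nat :=
  if h : j < cs.length then
    if cs[j] = ']' then j else scanW cs (j + 1)
  else j
termination_by cs.length - j

-- with enough fuel the fueled scan computes the reference scan
theorem scanRB_eq_scanW (cs : List Char) :
    ∀ (fuel j : Nat), cs.length - j ≤ fuel → scanRB cs fuel j = scanW cs j := by
  intro fuel
  induction fuel with
  | zero =>
    intro j hf
    rw [scanW, scanRB]
    have : ¬ j < cs.length := by omega
    simp [this]
  | succ fuel ih =>
    intro j hf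
    rw [scanW, scanRB]
    by_cases hj : j < cs.length
    · simp only [hj, dif_pos]
      by_cases hc : cs[j] = ']'
      · rw [if_pos hc, if_pos hc]
      · rw [if_neg hc, if_neg hc, ih (j + 1) (by omega)]
    · simp [hj]

-- the table entry at offset m is exactly what A's rescan from that absolute position computes
theorem buildNxtFrom_getD :
    ∀ (suf pre : List Char) (m d : Nat), m ≤ suf.length →
      (buildNxtFrom suf pre.length (pre ++ suf).length).getD m d = scanW (pre ++ suf) (pre.length + m) := by
  intro suf
  induction suf with
  | nil =>
    intro pre m d hm
    have hm0 : m = 0 := by simpa using hm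
    subst hm0
    rw [scanW]
    simp [buildNxtFrom]
  | cons c rest ih =>
    intro pre m d hm
    have hcs : pre ++ c :: rest = (pre ++ [c]) ++ rest := by simp
    have hlen : (pre ++ [c]).length = pre.length + 1 := by simp
    match m with
    | 0 =>
      have ht : ∀ d', (buildNxtFrom rest (pre.length + 1) (pre ++ c :: rest).length).getD 0 d'
          = scanW (pre ++ c :: rest) (pre.length + 1) := by
        intro d'
        have h := ih (pre ++ [c]) 0 d' (by omega)
        rw [← hcs, hlen] at h
        simpa using h
      have hk : pre.length < (pre ++ c :: rest).length := by simp
      have hget : (pre ++ c :: rest)[pre.length]'hk = c := by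
        rw [List.getElem_append_right (by omega)]
        simp
      rw [scanW]
      simp only [Nat.add_zero]
      rw [dif_pos hk, hget]
      by_cases hc : c = ']'
      · simp [buildNxtFrom, hc]
      · simp only [buildNxtFrom, List.getD_cons_zero, if_neg hc]
        rw [ht]
    | m' + 1 =>
      have h := ih (pre ++ [c]) m' d (by simpa using hm)
      rw [← hcs, hlen] at h
      simp only [buildNxtFrom, List.getD_cons_succ]
      rw [h]
      congr 1
      omega

-- a successful two-character match forces i + 1 < length
theorem take2_lt (cs : List Char) (i : Nat) (a b : Char)
    (h : (cs.drop i).take 2 = [a, b]) : i + 1 < cs.length := by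
  have := congrArg List.length h
  simp at this
  omega

-- the two main loops agree step by step once the table lookup is rewritten to A's rescan
theorem tok_eq (cs : List Char) :
    ∀ (fuel i : Nat), tokB cs (buildNxtFrom cs 0 cs.length) fuel i = tokA cs fuel i := by
  intro fuel
  induction fuel with
  | zero => intro i; rw [tokA, tokB]
  | succ fuel ih =>
    intro i
    by_cases hi : i < cs.length
    · have hnxt : (buildNxtFrom cs 0 cs.length).getD (i + 1) 0 = scanRB cs cs.length (i + 1) := by
        have h := buildNxtFrom_getD cs [] (i + 1) 0 (by omega)
        rw [scanRB_eq_scanW cs cs.length (i + 1) (by omega)]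
        simpa using h
      rw [tokA, tokB]
      simp only [hi, dif_pos, hnxt]
      by_cases hbr : cs[i] = '['
      · rw [if_pos hbr, if_pos hbr]
        by_cases hj : scanRB cs cs.length (i + 1) < cs.length
        · rw [if_pos hj, if_neg (by omega), ih _]
        · rw [if_neg hj, if_pos (by omega), ih _]
      · rw [if_neg hbr, if_neg hbr]
        by_cases h2 : (cs.drop i).take 2 = ['C', 'l'] ∨ (cs.drop i).take 2 = ['B', 'r']
        · have hlt : i + 1 < cs.length := by
            rcases h2 with h2 | h2 <;> exact take2_lt cs i _ _ h2
          rw [if_pos h2, if_pos ⟨hlt, h2⟩, ih _]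
        · rw [if_neg h2,
              if_neg (show ¬(i + 1 < cs.length ∧ ((cs.drop i).take 2 = ['C','l'] ∨ (cs.drop i).take 2 = ['B','r'])) from fun hc => h2 hc.2)]
          by_cases hp : cs[i] = '%'
          · by_cases hl : i + 2 < cs.length
            · rw [if_pos (show cs[i] = '%' ∧ i + 2 < cs.length from ⟨hp, hl⟩),
                  if_pos hp, if_pos hl, ih _]
            · rw [if_neg (show ¬(cs[i] = '%' ∧ i + 2 < cs.length) from fun hc => hl hc.2),
                  if_pos hp, if_neg hl,
                  if_neg (show ¬ cs[i] = ' ' by rw [hp]; decide), ih _]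
          · rw [if_neg (show ¬(cs[i] = '%' ∧ i + 2 < cs.length) from fun hc => hp hc.1), if_neg hp]
            by_cases hsp : cs[i] = ' '
            · rw [if_pos hsp, ih _,
                 if_neg (show cs[i] ∉ ['0','1','2','3','4','5','6','7','8','9'] by rw [hsp]; decide),
                 if_pos (show cs[i] ∈ ['(',')','[',']','=','#','@','+','-','\\','/','.',':',' '] by rw [hsp]; decide),
                 if_neg (show ¬ cs[i] ≠ ' ' by simpa using hsp)]
              simp
            · rw [if_neg hsp, ih _]
              by_cases hd : cs[i] ∈ ['0','1','2','3','4','5','6','7','8','9']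
              · rw [if_pos hd]
              · rw [if_neg hd]
                by_cases hs : cs[i] ∈ ['(',')','[',']','=','#','@','+','-','\\','/','.',':',' ']
                · rw [if_pos hs, if_pos hsp]
                  simp
                · rw [if_neg hs]
                  by_cases ha : PySem.Chars.isalpha cs[i]
                  · rw [if_pos ha]
                  · rw [if_neg ha]
    · rw [tokA, tokB]
      simp [hi]

-- ===== VERDICT (by name: the statement is the Claim_ definition above) =====
theorem tokenize_smiles_basic_spec : Claim_equal_tokenize_smiles_basic := by
  intro smiles _
  unfold Spec_tokenize_smiles_basic tokenize_smiles_basic tokenize_smiles_basic_alt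
  exact (tok_eq smiles.toList smiles.toList.length 0).symm
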